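-- pv_equiv track=rewrite | github.com/pisterlabs/promptset | data/scraping-2.0/repos/Snarkdoof~transcribe/modules~mod_chapters.py | collect_subtitles
-- ===== SOURCE A (Python) =====
-- import copy
--
-- def collect_subtitles(subs):
--     """
--     Summarize subtitles pr. person. Basically just
--     group the texts if they have the same speaker.
--
--     Returns equivalent to subs, with start, end and text tags collected
--     """
--
--     summarized = []
--     for item in subs:
--         if len(summarized) == 0 or item["who"] != summarized[-1]["who"]:
--             summarized.append(copy.copy(item))
--             continue
--
--         # Same user still
--         summarized[-1]["text"] += " " + item["text"]
--         summarized[-1]["end"] = item["end"]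
--
--     return summarized
-- ===== SOURCE B (Python) =====
-- import copy
--
--
-- def collect_subtitles(subs):
--     """
--     Summarize subtitles pr. person: scan for maximal runs of consecutive
--     entries with the same speaker, then emit one merged entry per run
--     (joined text, end of the last run member, other keys from the first).
--     Single-entry runs pass through as a plain copy.
--     """
--     summarized = []
--     i = 0
--     n = len(subs)
--     while i < n:
--         j = i + 1
--         while j < n and subs[j]["who"] == subs[j - 1]["who"]:
--             j += 1
--         group = subs[i:j]
--         merged = copy.copy(group[0])
--         if len(group) > 1:
--             merged["text"] = " ".join(item["text"] for item in group)
--             merged["end"] = group[-1]["end"]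
--         summarized.append(merged)
--         i = j
--     return summarized
-- ===== Notes on version B (the rewrite author's own statement) =====
-- stated objective: idiomatic
-- what changed: A grows the result incrementally, mutating the last appended entry on every same-speaker item; B instead scans each maximal run of consecutive same-speaker entries and emits one merged entry per run via a single ' '.join and one end assignment (single-entry runs pass through as a plain copy).
import Mathlib
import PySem

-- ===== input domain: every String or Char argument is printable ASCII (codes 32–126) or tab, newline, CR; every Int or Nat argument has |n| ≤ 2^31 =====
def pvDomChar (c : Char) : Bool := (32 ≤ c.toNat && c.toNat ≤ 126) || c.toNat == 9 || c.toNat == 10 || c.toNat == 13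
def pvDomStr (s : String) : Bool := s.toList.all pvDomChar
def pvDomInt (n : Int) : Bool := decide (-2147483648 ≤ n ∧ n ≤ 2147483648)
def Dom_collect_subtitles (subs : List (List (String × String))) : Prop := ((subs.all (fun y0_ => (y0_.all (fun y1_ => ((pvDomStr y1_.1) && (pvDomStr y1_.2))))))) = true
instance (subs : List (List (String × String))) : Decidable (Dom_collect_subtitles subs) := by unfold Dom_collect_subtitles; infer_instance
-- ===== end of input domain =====

-- B groups each maximal run of consecutive same-speaker entries and merges it in one go,
-- instead of A's mutate-the-last-appended-entry fold (objective: idiomatic; return value only, neither mutates its input).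

-- ===== PORT A =====
-- summarized[-1]["text"] += " " + item["text"]; summarized[-1]["end"] = item["end"]
-- key lookups item["who"] / ["text"] / ["end"] are ported with getD ""; exact under Pre_ (the keys A reads are present, so no KeyError)
def pvMergeA (last item : PySem.Dict String String) : PySem.Dict String String :=
  (last.insert "text" (last.getD "text" "" ++ " " ++ item.getD "text" "")).insert "end" (item.getD "end" "")

-- one iteration of A's for-loop over `summarized`
def pvStepA (summarized : List (PySem.Dict String String)) (item : PySem.Dict String String) :
    List (PySem.Dict String String) :=
  match summarized.getLast? with
  | none => summarized ++ [item]                                   -- len(summarized) == 0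
  | some last =>
    if item.getD "who" "" ≠ last.getD "who" "" then summarized ++ [item]   -- new speaker: append copy
    else summarized.dropLast ++ [pvMergeA last item]               -- same speaker: mutate last in place

def collect_subtitles (subs : List (List (String × String))) : List (List (String × String)) :=
  (((subs.map PySem.Dict.mk).foldl pvStepA [])).map PySem.Dict.items

-- ===== PORT B =====
-- merged = copy.copy(group[0]); if len(group) > 1: merged["text"] = " ".join(texts); merged["end"] = group[-1]["end"]
def pvCombine (x : PySem.Dict String String) (r : List (PySem.Dict String String)) :
    PySem.Dict String String :=
  match r with
  | [] => x                                                        -- single-entry run: plain copy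
  | _ =>
    (x.insert "text" (PySem.Str.join " " ((x :: r).map (fun i => i.getD "text" "")))).insert
      "end" ((r.getLastD x).getD "end" "")

-- inner while-loop of B: extend the run while subs[j]["who"] == subs[j-1]["who"]; returns (rest of run, remainder)
def pvRun (prev : PySem.Dict String String) : List (PySem.Dict String String) →
    List (PySem.Dict String String) × List (PySem.Dict String String)
  | [] => ([], [])
  | y :: ys =>
    if y.getD "who" "" == prev.getD "who" "" then
      let p := pvRun y ys
      (y :: p.1, p.2)
    else ([], y :: ys)

theorem pvRun_rest_le (prev : PySem.Dict String String) :
    ∀ xs : List (PySem.Dict String String), (pvRun prev xs).2.length ≤ xs.length := by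
  intro xs
  induction xs generalizing prev with
  | nil => simp [pvRun]
  | cons y ys ih =>
    simp only [pvRun]
    split
    · exact le_trans (ih y) (Nat.le_succ _)
    · exact le_refl _

-- outer while-loop of B: peel off the maximal run subs[i:j] of the current speaker, merge it, continue at j
def pvGo : List (PySem.Dict String String) → List (PySem.Dict String String)
  | [] => []
  | x :: xs =>
    pvCombine x (pvRun x xs).1 :: pvGo (pvRun x xs).2
termination_by l => l.length
decreasing_by
  exact Nat.lt_succ_of_le (pvRun_rest_le x xs)

def collect_subtitles_alt (subs : List (List (String × String))) : List (List (String × String)) :=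
  (pvGo (subs.map PySem.Dict.mk)).map PySem.Dict.items

-- ===== PRECONDITION & SPEC =====
-- Pre_ excludes inputs where the Python raises KeyError: a consecutive pair of items missing "who", or a
-- consecutive same-speaker pair missing the "text"/"end" keys the merge reads; it also excludes
-- association lists with duplicate keys, which do not represent a Python dict.
def Pre_collect_subtitles (subs : List (List (String × String))) : Prop :=
  (∀ item ∈ subs, (PySem.Dict.mk item).keys.Nodup) ∧
  (∀ p ∈ subs.zip subs.tail,
    (PySem.Dict.mk p.1).contains "who" = true ∧ (PySem.Dict.mk p.2).contains "who" = true ∧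
    ((PySem.Dict.mk p.1).getD "who" "" = (PySem.Dict.mk p.2).getD "who" "" →
      (PySem.Dict.mk p.1).contains "text" = true ∧ (PySem.Dict.mk p.2).contains "text" = true ∧
        (PySem.Dict.mk p.2).contains "end" = true))

instance (subs : List (List (String × String))) : Decidable (Pre_collect_subtitles subs) := by
  unfold Pre_collect_subtitles; infer_instance

def pvWitness_collect_subtitles : (List (List (String × String))) :=
  [[("who", "alice"), ("text", "hi"), ("end", "1")],
   [("who", "alice"), ("text", "there"), ("end", "2")],
   [("who", "bob"), ("text", "yo"), ("end", "3")]]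

def Spec_collect_subtitles (subs : List (List (String × String))) (out : List (List (String × String))) : Prop := out = collect_subtitles_alt subs
instance (subs : List (List (String × String))) (out : List (List (String × String))) : Decidable (Spec_collect_subtitles subs out) := by unfold Spec_collect_subtitles; infer_instance

-- ===== CLAIM (what is proved, stated in full; the proofs are below) =====
def Claim_equal_collect_subtitles : Prop := ∀ (subs : List (List (String × String))), Dom_collect_subtitles subs → Pre_collect_subtitles subs → Spec_collect_subtitles subs (collect_subtitles subs)

-- ===== LEMMAS AND PROOFS =====

theorem pv_join_singleton (x : String) : PySem.Str.join " " [x] = x := by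
  simp [PySem.Str.join, PySem.Chars.join, List.intercalate]

theorem pv_join_merge (a b : String) (ts : List String) :
    PySem.Str.join " " ((a ++ " " ++ b) :: ts) = PySem.Str.join " " (a :: b :: ts) := by
  cases ts <;> simp [PySem.Str.join, PySem.Chars.join, List.intercalate, String.ofList]

theorem pv_join_pair (a b : String) : PySem.Str.join " " [a, b] = a ++ " " ++ b := by
  rw [← pv_join_merge a b [], pv_join_singleton]

-- later writes to "text"/"end" supersede earlier ones (items compared via keys + lookups; keys unique)
theorem pv_insert_collapse (d : PySem.Dict String String) (a b c f : String)
    (hnd : d.keys.Nodup) :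
    (((d.insert "text" a).insert "end" b).insert "text" c).insert "end" f
      = (d.insert "text" c).insert "end" f := by
  have nd4 : ((((d.insert "text" a).insert "end" b).insert "text" c).insert "end" f).keys.Nodup := by
    exact PySem.Dict.nodup_keys_insert _ _ _ (PySem.Dict.nodup_keys_insert _ _ _
      (PySem.Dict.nodup_keys_insert _ _ _ (PySem.Dict.nodup_keys_insert _ _ _ hnd)))
  have ndR : ((d.insert "text" c).insert "end" f).keys.Nodup := by
    exact PySem.Dict.nodup_keys_insert _ _ _ (PySem.Dict.nodup_keys_insert _ _ _ hnd)
  have hkeys : ((((d.insert "text" a).insert "end" b).insert "text" c).insert "end" f).keys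
      = ((d.insert "text" c).insert "end" f).keys := by
    by_cases ht : d.contains "text" = true <;> by_cases he : d.contains "end" = true <;>
      simp [PySem.Dict.keys_insert_of_contains, PySem.Dict.keys_insert_of_not_contains,
        PySem.Dict.contains_insert, ht, he]
  have hg : ∀ k, ((((d.insert "text" a).insert "end" b).insert "text" c).insert "end" f).getD k ""
      = ((d.insert "text" c).insert "end" f).getD k "" := by
    intro k
    simp only [PySem.Dict.getD_insert]
    split_ifs <;> rfl
  apply PySem.Dict.ext
  rw [PySem.Dict.items_eq_map_keys _ nd4 "", PySem.Dict.items_eq_map_keys _ ndR "", hkeys]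
  exact List.map_congr_left (fun k _ => by rw [hg k])

-- A's fold only ever touches the last element: a prefix passes through unchanged
theorem pv_foldA_append : ∀ (xs : List (PySem.Dict String String))
    (acc : List (PySem.Dict String String)) (d : PySem.Dict String String),
    List.foldl pvStepA (acc ++ [d]) xs = acc ++ List.foldl pvStepA [d] xs := by
  intro xs
  induction xs with
  | nil => intro acc d; rfl
  | cons x xs ih =>
    intro acc d
    simp only [List.foldl_cons]
    have hstep : pvStepA (acc ++ [d]) x =
        if x.getD "who" "" ≠ d.getD "who" "" then (acc ++ [d]) ++ [x]
        else acc ++ [pvMergeA d x] := by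
      simp [pvStepA]
    have hstep1 : pvStepA [d] x =
        if x.getD "who" "" ≠ d.getD "who" "" then [d, x] else [pvMergeA d x] := by
      simp [pvStepA]
    by_cases h : x.getD "who" "" ≠ d.getD "who" ""
    · rw [hstep, if_pos h, hstep1, if_pos h]
      have l1 : List.foldl pvStepA ((acc ++ [d]) ++ [x]) xs
          = (acc ++ [d]) ++ List.foldl pvStepA [x] xs := ih (acc ++ [d]) x
      have l2 : List.foldl pvStepA [d, x] xs = [d] ++ List.foldl pvStepA [x] xs := by
        have := ih [d] x; simpa using this
      rw [l1, l2]; simp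
    · rw [hstep, if_neg h, hstep1, if_neg h]
      have l1 := ih acc (pvMergeA d x)
      rw [l1]

theorem pv_who_merge (d y : PySem.Dict String String) :
    (pvMergeA d y).getD "who" "" = d.getD "who" "" := by
  unfold pvMergeA
  rw [PySem.Dict.getD_insert_of_ne _ _ _ (by decide : ("who" : String) ≠ "end"),
      PySem.Dict.getD_insert_of_ne _ _ _ (by decide : ("who" : String) ≠ "text")]

-- A's fold, started on a fresh entry d, merges exactly the maximal run of d's speaker into d
theorem pv_foldA_run : ∀ (xs : List (PySem.Dict String String)) (d : PySem.Dict String String),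
    List.foldl pvStepA [d] xs =
      List.foldl pvMergeA d (xs.takeWhile (fun y => y.getD "who" "" == d.getD "who" "")) ::
        List.foldl pvStepA [] (xs.dropWhile (fun y => y.getD "who" "" == d.getD "who" "")) := by
  intro xs
  induction xs with
  | nil => intro d; rfl
  | cons y ys ih =>
    intro d
    by_cases hw : (y.getD "who" "" == d.getD "who" "") = true
    · have heq : y.getD "who" "" = d.getD "who" "" := by simpa using hw
      have hstep : pvStepA [d] y = [pvMergeA d y] := by
        simp [pvStepA, heq]
      rw [List.foldl_cons, hstep]
      rw [ih (pvMergeA d y)]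
      simp only [pv_who_merge, List.takeWhile_cons, List.dropWhile_cons, hw, if_true,
        List.foldl_cons]
    · have hne : y.getD "who" "" ≠ d.getD "who" "" := by simpa using hw
      have hstep : pvStepA [d] y = [d, y] := by
        simp [pvStepA, hne]
      rw [List.foldl_cons, hstep]
      have l2 : List.foldl pvStepA [d, y] ys = [d] ++ List.foldl pvStepA [y] ys := by
        have := pv_foldA_append ys [d] y; simpa using this
      have l3 : List.foldl pvStepA [] (y :: ys) = List.foldl pvStepA [y] ys := by
        simp [pvStepA]
      rw [l2]
      simp only [List.takeWhile_cons, List.dropWhile_cons, hw, if_false, Bool.false_eq_true,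
        List.foldl_nil, l3]
      rfl

-- iterated in-place merging of a run equals B's one-shot combine
theorem pv_mergeRun_eq_combine : ∀ (r : List (PySem.Dict String String))
    (d : PySem.Dict String String), d.keys.Nodup →
    List.foldl pvMergeA d r = pvCombine d r := by
  intro r
  induction r with
  | nil => intro d _; rfl
  | cons y r' ih =>
    intro d hnd
    have hnd' : (pvMergeA d y).keys.Nodup := by
      unfold pvMergeA
      exact PySem.Dict.nodup_keys_insert _ _ _ (PySem.Dict.nodup_keys_insert _ _ _ hnd)
    rw [List.foldl_cons, ih (pvMergeA d y) hnd']
    have htext : (pvMergeA d y).getD "text" "" = d.getD "text" "" ++ " " ++ y.getD "text" "" := by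
      unfold pvMergeA
      rw [PySem.Dict.getD_insert_of_ne _ _ _ (by decide : ("text" : String) ≠ "end"),
          PySem.Dict.getD_insert_self]
    cases r' with
    | nil =>
      show pvMergeA d y = pvCombine d [y]
      unfold pvMergeA pvCombine
      simp only [List.map_cons, List.map_nil, List.getLastD_cons, List.getLastD_nil]
      rw [pv_join_pair]
    | cons z r'' =>
      show pvCombine (pvMergeA d y) (z :: r'') = pvCombine d (y :: z :: r'')
      unfold pvCombine
      simp only [List.map_cons]
      have hendv : ((z :: r'').getLastD (pvMergeA d y)).getD "end" ""
          = ((z :: r'').getLastD d).getD "end" "" := by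
        cases h : (z :: r'').getLast? with
        | none => simp at h
        | some w => simp [List.getLastD]
      rw [hendv, htext, pv_join_merge]
      show (((( d.insert "text" _).insert "end" _).insert "text" _).insert "end" _) = _
      rw [pv_insert_collapse d _ _ _ _ hnd]
      simp [List.getLastD]

-- adjacent-speaker comparison agrees with comparison against the run head (string equality is transitive)
theorem pvRun_eq : ∀ (xs : List (PySem.Dict String String)) (prev : PySem.Dict String String),
    pvRun prev xs = (xs.takeWhile (fun y => y.getD "who" "" == prev.getD "who" ""),
      xs.dropWhile (fun y => y.getD "who" "" == prev.getD "who" "")) := by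
  intro xs
  induction xs with
  | nil => intro prev; rfl
  | cons y ys ih =>
    intro prev
    by_cases hw : (y.getD "who" "" == prev.getD "who" "") = true
    · have heq : y.getD "who" "" = prev.getD "who" "" := by simpa using hw
      simp [pvRun, ih y, heq]
    · simp only [pvRun, List.takeWhile_cons, List.dropWhile_cons]
      simp [hw]

-- A's whole fold equals B's run-by-run recursion (fuel = list length)
theorem pv_main : ∀ (n : ℕ) (ds : List (PySem.Dict String String)), ds.length ≤ n →
    (∀ d ∈ ds, d.keys.Nodup) →
    List.foldl pvStepA [] ds = pvGo ds := by
  intro n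
  induction n with
  | zero =>
    intro ds hlen _
    have : ds = [] := List.eq_nil_of_length_eq_zero (Nat.le_zero.mp hlen)
    subst this; simp [pvGo]
  | succ n ih =>
    intro ds hlen hprops
    cases ds with
    | nil => simp [pvGo]
    | cons d ds' =>
      have hstep0 : List.foldl pvStepA [] (d :: ds') = List.foldl pvStepA [d] ds' := by
        simp [pvStepA]
      rw [hstep0, pv_foldA_run]
      rw [pv_mergeRun_eq_combine _ d (hprops d (List.mem_cons_self ..))]
      have hrec : List.foldl pvStepA []
            (ds'.dropWhile (fun y => y.getD "who" "" == d.getD "who" ""))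
          = pvGo (ds'.dropWhile (fun y => y.getD "who" "" == d.getD "who" "")) := by
        apply ih
        · exact le_trans (List.length_dropWhile_le _ _) (Nat.le_of_succ_le_succ hlen)
        · intro x hx
          exact hprops x (List.mem_cons_of_mem _ ((List.dropWhile_sublist _).mem hx))
      rw [hrec]
      conv_rhs => rw [pvGo]
      rw [pvRun_eq]

-- ===== VERDICT (by name: the statement is the Claim_ definition above) =====
theorem collect_subtitles_spec : Claim_equal_collect_subtitles := by
  intro subs _hdom hpre
  unfold Spec_collect_subtitles collect_subtitles collect_subtitles_alt
  congr 1
  apply pv_main (subs.map PySem.Dict.mk).length _ le_rfl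
  intro d hd
  obtain ⟨item, hitem, rfl⟩ := List.mem_map.mp hd
  exact hpre.1 item hitem
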